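-- pv_equiv track=rewrite | github.com/GauchoAI/chuk-lazurus | src/chuk_lazarus/inference/context/knowledge/build.py | _fill_entity_gaps
-- ===== SOURCE A (Python) =====
-- def _fill_entity_gaps(
--     selected_positions: set[int],
--     chunk_ids: list[int],
--     max_gap: int = 2,
-- ) -> set[int]:
--     """Fill gaps between nearby selected positions.
--
--     If positions 98 and 100 are both selected, position 99 is a gap
--     within an entity. Fill it — the gap token (" C") is part of
--     "Coyle" even though its IDF is too low for selection.
--     """
--     filled = set(selected_positions)
--     sorted_pos = sorted(selected_positions)
--
--     for i in range(len(sorted_pos) - 1):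
--         gap = sorted_pos[i + 1] - sorted_pos[i]
--         if 1 < gap <= max_gap + 1:
--             for p in range(sorted_pos[i] + 1, sorted_pos[i + 1]):
--                 if 0 < p < len(chunk_ids):  # bounds check
--                     filled.add(p)
--
--     return filled
-- ===== SOURCE B (Python) =====
-- def _fill_entity_gaps(
--     selected_positions: set[int],
--     chunk_ids: list[int],
--     max_gap: int = 2,
-- ) -> set[int]:
--     """Fill gaps between nearby selected positions, without sorting.
--
--     A position p is a gap-fill iff its nearest selected neighbours
--     lo < p < hi satisfy hi - lo <= max_gap + 1.
--     """
--     filled = set(selected_positions)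
--     for p in range(1, len(chunk_ids)):
--         lo = max((s for s in selected_positions if s < p), default=None)
--         hi = min((t for t in selected_positions if t > p), default=None)
--         if lo is not None and hi is not None and hi - lo <= max_gap + 1:
--             filled.add(p)
--     return filled
-- ===== Notes on version B (the rewrite author's own statement) =====
-- stated objective: alternative
-- what changed: Replaces sort-then-scan-adjacent-pairs with a direct scan of every candidate position 1..len(chunk_ids)-1, filling p iff its nearest selected neighbours lo < p < hi satisfy hi - lo <= max_gap + 1.
import Mathlib
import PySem

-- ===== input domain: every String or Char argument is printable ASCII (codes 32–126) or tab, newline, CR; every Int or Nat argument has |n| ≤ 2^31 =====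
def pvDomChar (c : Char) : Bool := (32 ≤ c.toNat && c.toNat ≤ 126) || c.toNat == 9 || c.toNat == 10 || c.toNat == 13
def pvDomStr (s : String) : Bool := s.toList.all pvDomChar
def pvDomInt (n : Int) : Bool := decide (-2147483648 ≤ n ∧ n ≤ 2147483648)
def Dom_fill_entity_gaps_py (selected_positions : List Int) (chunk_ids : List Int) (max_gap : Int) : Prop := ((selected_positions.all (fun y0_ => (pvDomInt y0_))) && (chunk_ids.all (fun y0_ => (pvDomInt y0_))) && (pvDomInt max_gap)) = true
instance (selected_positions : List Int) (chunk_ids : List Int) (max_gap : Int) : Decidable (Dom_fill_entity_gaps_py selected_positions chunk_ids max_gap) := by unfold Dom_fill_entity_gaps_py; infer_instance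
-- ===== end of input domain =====

-- B replaces A's sort-then-scan-of-adjacent-pairs with a direct scan of all candidate
-- positions, probing bracketing selected pairs by set membership (alternative algorithm,
-- no speed claim). Both return the set; equality below is of the PySem.Set element lists.

-- ===== PORT A =====
def fill_entity_gaps_py (selected_positions : List Int) (chunk_ids : List Int) (max_gap : Int) : List Int :=
  let filled := PySem.Set.ofList selected_positions
  let sorted_pos := PySem.List.sorted selected_positions (fun x => x) false
  (PySem.List.pyRange 0 ((sorted_pos.length : Int) - 1) 1).foldl
    (fun filled i =>
      let gap := PySem.List.pyGetD sorted_pos (i + 1) 0 - PySem.List.pyGetD sorted_pos i 0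
      if 1 < gap ∧ gap ≤ max_gap + 1 then
        (PySem.List.pyRange (PySem.List.pyGetD sorted_pos i 0 + 1) (PySem.List.pyGetD sorted_pos (i + 1) 0) 1).foldl
          (fun filled p =>
            if 0 < p ∧ p < (chunk_ids.length : Int) then PySem.Set.add filled p else filled)
          filled
      else filled)
    filled

-- ===== PORT B =====
def fill_entity_gaps_py_alt (selected_positions : List Int) (chunk_ids : List Int) (max_gap : Int) : List Int :=
  let filled := PySem.Set.ofList selected_positions
  (PySem.List.pyRange 1 (chunk_ids.length : Int) 1).foldl
    (fun filled p =>
      let lo := PySem.List.max? (selected_positions.filter (fun s => decide (s < p))) (fun x => x)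
      let hi := PySem.List.min? (selected_positions.filter (fun t => decide (p < t))) (fun x => x)
      match lo, hi with
      | some lo, some hi =>
        if hi - lo ≤ max_gap + 1 then PySem.Set.add filled p else filled
      | _, _ => filled)
    filled

-- ===== PRECONDITION & SPEC =====
def Spec_fill_entity_gaps_py (selected_positions : List Int) (chunk_ids : List Int) (max_gap : Int) (out : List Int) : Prop := out = fill_entity_gaps_py_alt selected_positions chunk_ids max_gap
instance (selected_positions : List Int) (chunk_ids : List Int) (max_gap : Int) (out : List Int) : Decidable (Spec_fill_entity_gaps_py selected_positions chunk_ids max_gap out) := by unfold Spec_fill_entity_gaps_py; infer_instance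

-- ===== CLAIM (what is proved, stated in full; the proofs are below) =====
def Claim_equal_fill_entity_gaps_py : Prop := ∀ (selected_positions : List Int) (chunk_ids : List Int) (max_gap : Int), Dom_fill_entity_gaps_py selected_positions chunk_ids max_gap → Spec_fill_entity_gaps_py selected_positions chunk_ids max_gap (fill_entity_gaps_py selected_positions chunk_ids max_gap)

-- ===== LEMMAS AND PROOFS =====

-- the sorted copy of the selected positions (A's `sorted_pos`)
def pvSp (sel : List Int) : List Int := PySem.List.sorted sel (fun x => x) false

-- B's membership probe for a candidate position p
def pvPredB (sel : List Int) (max_gap p : Int) : Bool :=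
  match PySem.List.max? (sel.filter (fun s => decide (s < p))) (fun x => x),
        PySem.List.min? (sel.filter (fun t => decide (p < t))) (fun x => x) with
  | some lo, some hi => decide (hi - lo ≤ max_gap + 1)
  | _, _ => false

-- the list of positions A's loop pushes through Set.add, in push order
def pvLA (sel : List Int) (chunk_ids : List Int) (max_gap : Int) : List Int :=
  (PySem.List.pyRange 0 (((pvSp sel).length : Int) - 1) 1).flatMap
    (fun i =>
      if 1 < PySem.List.pyGetD (pvSp sel) (i + 1) 0 - PySem.List.pyGetD (pvSp sel) i 0 ∧
         PySem.List.pyGetD (pvSp sel) (i + 1) 0 - PySem.List.pyGetD (pvSp sel) i 0 ≤ max_gap + 1 then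
        (PySem.List.pyRange (PySem.List.pyGetD (pvSp sel) i 0 + 1) (PySem.List.pyGetD (pvSp sel) (i + 1) 0) 1).filter
          (fun p => decide (0 < p ∧ p < (chunk_ids.length : Int)))
      else [])

-- the list of positions B's loop pushes through Set.add, in push order
def pvRB (sel : List Int) (chunk_ids : List Int) (max_gap : Int) : List Int :=
  (PySem.List.pyRange 1 (chunk_ids.length : Int) 1).filter (fun p => pvPredB sel max_gap p)

-- a conditional-add loop is Set.update with the filtered list
lemma pv_foldl_add_ite (c : Int → Prop) [DecidablePred c] (l : List Int) (s : PySem.Set Int) :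
    l.foldl (fun s x => if c x then PySem.Set.add s x else s) s
      = PySem.Set.update s (l.filter (fun x => decide (c x))) := by
  induction l generalizing s with
  | nil => rfl
  | cons x t ih =>
    by_cases hx : c x <;>
      simp [hx, PySem.Set.update_cons, ih]

-- a conditional-update loop is Set.update with the flattened list
lemma pv_foldl_update_ite (c : Int → Prop) [DecidablePred c] (w : Int → List Int)
    (l : List Int) (s : PySem.Set Int) :
    l.foldl (fun s i => if c i then PySem.Set.update s (w i) else s) s
      = PySem.Set.update s (l.flatMap (fun i => if c i then w i else [])) := by
  induction l generalizing s with
  | nil => rfl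
  | cons x t ih =>
    by_cases hx : c x <;>
      simp [List.flatMap_cons, hx, PySem.Set.update_append, ih]

-- A's result is the base set updated with pvLA
lemma pv_A_shape (sel chunk_ids : List Int) (max_gap : Int) :
    fill_entity_gaps_py sel chunk_ids max_gap
      = PySem.Set.update (PySem.Set.ofList sel) (pvLA sel chunk_ids max_gap) := by
  have h : fill_entity_gaps_py sel chunk_ids max_gap
      = (PySem.List.pyRange 0 (((pvSp sel).length : Int) - 1) 1).foldl
          (fun filled i =>
            if 1 < PySem.List.pyGetD (pvSp sel) (i + 1) 0 - PySem.List.pyGetD (pvSp sel) i 0 ∧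
               PySem.List.pyGetD (pvSp sel) (i + 1) 0 - PySem.List.pyGetD (pvSp sel) i 0 ≤ max_gap + 1 then
              (PySem.List.pyRange (PySem.List.pyGetD (pvSp sel) i 0 + 1) (PySem.List.pyGetD (pvSp sel) (i + 1) 0) 1).foldl
                (fun f p => if 0 < p ∧ p < (chunk_ids.length : Int) then PySem.Set.add f p else f)
                filled
            else filled)
          (PySem.Set.ofList sel) := rfl
  rw [h]
  rw [PySem.List.foldl_congr_mem _ _
    (fun (s : PySem.Set Int) (i : Int) =>
      if 1 < PySem.List.pyGetD (pvSp sel) (i + 1) 0 - PySem.List.pyGetD (pvSp sel) i 0 ∧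
         PySem.List.pyGetD (pvSp sel) (i + 1) 0 - PySem.List.pyGetD (pvSp sel) i 0 ≤ max_gap + 1 then
        PySem.Set.update s
          ((PySem.List.pyRange (PySem.List.pyGetD (pvSp sel) i 0 + 1) (PySem.List.pyGetD (pvSp sel) (i + 1) 0) 1).filter
            (fun p => decide (0 < p ∧ p < (chunk_ids.length : Int))))
      else s)
    _ ?hc]
  · rw [pv_foldl_update_ite]; rfl
  · intro acc i _
    by_cases hc : (1 < PySem.List.pyGetD (pvSp sel) (i + 1) 0 - PySem.List.pyGetD (pvSp sel) i 0 ∧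
         PySem.List.pyGetD (pvSp sel) (i + 1) 0 - PySem.List.pyGetD (pvSp sel) i 0 ≤ max_gap + 1)
    · simp only [hc]
      exact pv_foldl_add_ite _ _ _
    · simp only [hc, if_false]

-- B's result is the base set updated with pvRB
lemma pv_B_shape (sel chunk_ids : List Int) (max_gap : Int) :
    fill_entity_gaps_py_alt sel chunk_ids max_gap
      = PySem.Set.update (PySem.Set.ofList sel) (pvRB sel chunk_ids max_gap) := by
  have h : fill_entity_gaps_py_alt sel chunk_ids max_gap
      = (PySem.List.pyRange 1 (chunk_ids.length : Int) 1).foldl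
          (fun f p => if pvPredB sel max_gap p then PySem.Set.add f p else f)
          (PySem.Set.ofList sel) := by
    unfold fill_entity_gaps_py_alt
    apply PySem.List.foldl_congr_mem
    intro acc x _
    unfold pvPredB
    rcases hlo : PySem.List.max? (sel.filter (fun s => decide (s < x))) (fun x => x) with _ | lo <;>
      rcases hhi : PySem.List.min? (sel.filter (fun t => decide (x < t))) (fun x => x) with _ | hi <;>
        simp only [hlo, hhi] <;> try rfl
    by_cases hle : hi - lo ≤ max_gap + 1 <;> simp [hle]
  rw [h, pv_foldl_add_ite]
  unfold pvRB
  simp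

-- the neighbour probe holds iff some selected pair within max_gap+1 brackets p
lemma pv_predB_iff (sel : List Int) (max_gap p : Int) :
    pvPredB sel max_gap p = true ↔
      ∃ s ∈ sel, ∃ t ∈ sel, s < p ∧ p < t ∧ t - s ≤ max_gap + 1 := by
  unfold pvPredB
  constructor
  · intro h
    rcases hlo : PySem.List.max? (sel.filter (fun s => decide (s < p))) (fun x => x) with _ | lo
    · rw [hlo] at h; simp at h
    rcases hhi : PySem.List.min? (sel.filter (fun t => decide (p < t))) (fun x => x) with _ | hi
    · rw [hlo, hhi] at h; simp at h
    rw [hlo, hhi] at h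
    rw [decide_eq_true_eq] at h
    have hlom := List.mem_filter.mp (PySem.List.max?_mem hlo)
    have hhim := List.mem_filter.mp (PySem.List.min?_mem hhi)
    rw [decide_eq_true_eq] at hlom hhim
    exact ⟨lo, hlom.1, hi, hhim.1, hlom.2, hhim.2, h⟩
  · rintro ⟨s, hs, t, ht, hsp, hpt, hle⟩
    have hsF : s ∈ sel.filter (fun s => decide (s < p)) :=
      List.mem_filter.mpr ⟨hs, by simpa using hsp⟩
    have htF : t ∈ sel.filter (fun t => decide (p < t)) :=
      List.mem_filter.mpr ⟨ht, by simpa using hpt⟩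
    rcases hlo : PySem.List.max? (sel.filter (fun s => decide (s < p))) (fun x => x) with _ | lo
    · rw [PySem.List.max?_eq_none_iff] at hlo
      rw [hlo] at hsF
      simp at hsF
    rcases hhi : PySem.List.min? (sel.filter (fun t => decide (p < t))) (fun x => x) with _ | hi
    · rw [PySem.List.min?_eq_none_iff] at hhi
      rw [hhi] at htF
      simp at htF
    have h1 : s ≤ lo := PySem.List.max?_isMax hlo s hsF
    have h2 : hi ≤ t := PySem.List.min?_isMin hhi t htF
    rw [decide_eq_true_eq]
    omega

-- membership in pvRB
lemma pv_mem_RB (sel chunk_ids : List Int) (max_gap p : Int) :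
    p ∈ pvRB sel chunk_ids max_gap ↔
      (1 ≤ p ∧ p < (chunk_ids.length : Int)) ∧
      ∃ s ∈ sel, ∃ t ∈ sel, s < p ∧ p < t ∧ t - s ≤ max_gap + 1 := by
  unfold pvRB
  rw [List.mem_filter, PySem.List.mem_pyRange_one, pv_predB_iff]

-- the two bracketing conditions agree: an adjacent-within-gap pair exists iff any pair does
lemma pv_cond_iff (sel : List Int) (max_gap p : Int) :
    (∃ s ∈ sel, ∃ d, (2 ≤ d ∧ d < max_gap + 2) ∧ s < p ∧ p < s + d ∧ (s + d) ∈ sel) ↔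
    (∃ s ∈ sel, ∃ t ∈ sel, s < p ∧ p < t ∧ t - s ≤ max_gap + 1) := by
  constructor
  · rintro ⟨s, hs, d, ⟨h2, hlt⟩, hsp, hpd, hmem⟩
    exact ⟨s, hs, s + d, hmem, hsp, hpd, by omega⟩
  · rintro ⟨s, hs, t, ht, hsp, hpt, hle⟩
    refine ⟨s, hs, t - s, ⟨by omega, by omega⟩, hsp, by omega, ?_⟩
    have he : s + (t - s) = t := by omega
    rw [he]
    exact ht

-- indexing the sorted list: pyGetD at a nonnegative Int index
lemma pv_getD_int (sel : List Int) (i : Int) (h0 : 0 ≤ i) (h : i.toNat < (pvSp sel).length) :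
    PySem.List.pyGetD (pvSp sel) i 0 = (pvSp sel)[i.toNat]'h :=
  PySem.List.pyGetD_eq_getElem _ _ h0 (by omega)

lemma pv_getD_int_succ (sel : List Int) (i : Int) (h0 : 0 ≤ i) (h : i.toNat + 1 < (pvSp sel).length) :
    PySem.List.pyGetD (pvSp sel) (i + 1) 0 = (pvSp sel)[i.toNat + 1]'h := by
  rw [PySem.List.pyGetD_eq_getElem _ _ (by omega) (by omega)]
  simp only [show (i + 1).toNat = i.toNat + 1 from by omega]

-- the sorted list is monotone in its indices
lemma pv_sp_mono (sel : List Int) {a b : Nat} (hab : a ≤ b) (hb : b < (pvSp sel).length) :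
    (pvSp sel)[a]'(lt_of_le_of_lt (by omega) hb) ≤ (pvSp sel)[b]'hb :=
  PySem.List.sorted_id_getElem_mono sel hab hb

-- in the sorted list, a bracketed absent value is bracketed by an adjacent pair
lemma pv_exists_adjacent (sel : List Int) (s t p : Int)
    (hs : s ∈ pvSp sel) (ht : t ∈ pvSp sel) (h1 : s < p) (h2 : p < t) (hp : p ∉ pvSp sel) :
    ∃ j : Nat, ∃ hj : j + 1 < (pvSp sel).length,
      s ≤ (pvSp sel)[j]'(by omega) ∧ (pvSp sel)[j]'(by omega) < p ∧
      p < (pvSp sel)[j + 1]'hj ∧ (pvSp sel)[j + 1]'hj ≤ t := by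
  obtain ⟨j0, hj0, hj0v⟩ := List.mem_iff_getElem.mp hs
  obtain ⟨k0, hk0, hk0v⟩ := List.mem_iff_getElem.mp ht
  have hPj0 : (pvSp sel).getD j0 0 < p := by
    rw [List.getD_eq_getElem (pvSp sel) 0 hj0, hj0v]; exact h1
  have hjle : Nat.findGreatest (fun j => (pvSp sel).getD j 0 < p) ((pvSp sel).length - 1)
      ≤ (pvSp sel).length - 1 := Nat.findGreatest_le _
  set j := Nat.findGreatest (fun j => (pvSp sel).getD j 0 < p) ((pvSp sel).length - 1) with hj
  have hjlt : j < (pvSp sel).length := by omega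
  have hPj : (pvSp sel).getD j 0 < p :=
    Nat.findGreatest_spec (P := fun j => (pvSp sel).getD j 0 < p) (m := j0)
      (n := (pvSp sel).length - 1) (by omega) hPj0
  have hPjv : (pvSp sel)[j]'hjlt < p := by
    rwa [List.getD_eq_getElem (pvSp sel) 0 hjlt] at hPj
  have hj1 : j + 1 < (pvSp sel).length := by
    by_contra hcon
    have hmono : (pvSp sel)[k0]'hk0 ≤ (pvSp sel)[j]'hjlt :=
      pv_sp_mono sel (by omega) hjlt
    rw [hk0v] at hmono
    omega
  have hnotPj1 : ¬ ((pvSp sel).getD (j + 1) 0 < p) :=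
    Nat.findGreatest_is_greatest (P := fun j => (pvSp sel).getD j 0 < p)
      (n := (pvSp sel).length - 1) (by omega) (by omega)
  have h5 : p ≤ (pvSp sel)[j + 1]'hj1 := by
    rw [List.getD_eq_getElem (pvSp sel) 0 hj1] at hnotPj1
    omega
  have h6 : p < (pvSp sel)[j + 1]'hj1 := by
    rcases lt_or_eq_of_le h5 with h | h
    · exact h
    · exact absurd (h ▸ List.getElem_mem hj1) hp
  have hj0le : j0 ≤ j := by
    by_contra hcon
    exact (Nat.findGreatest_is_greatest (P := fun j => (pvSp sel).getD j 0 < p)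
      (n := (pvSp sel).length - 1) (by omega) (by omega)) hPj0
  have hsle : s ≤ (pvSp sel)[j]'hjlt := hj0v ▸ pv_sp_mono sel hj0le hjlt
  have hk0ge : j + 1 ≤ k0 := by
    by_contra hcon
    have hmono : (pvSp sel)[k0]'hk0 ≤ (pvSp sel)[j]'hjlt :=
      pv_sp_mono sel (by omega) hjlt
    rw [hk0v] at hmono
    omega
  have htge : (pvSp sel)[j + 1]'hj1 ≤ t := hk0v ▸ pv_sp_mono sel hk0ge hk0
  exact ⟨j, hj1, hsle, hPjv, h6, htge⟩

-- membership in pvLA, for p outside the selected set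
lemma pv_mem_LA (sel chunk_ids : List Int) (max_gap p : Int) (hp : p ∉ sel) :
    p ∈ pvLA sel chunk_ids max_gap ↔
      (1 ≤ p ∧ p < (chunk_ids.length : Int)) ∧
      ∃ s ∈ sel, ∃ d, (2 ≤ d ∧ d < max_gap + 2) ∧ s < p ∧ p < s + d ∧ (s + d) ∈ sel := by
  constructor
  · intro hmem
    rw [pvLA, List.mem_flatMap] at hmem
    obtain ⟨i, hiI, hpi⟩ := hmem
    rw [PySem.List.mem_pyRange_one] at hiI
    have h1n : i.toNat + 1 < (pvSp sel).length := by omega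
    have h0n : i.toNat < (pvSp sel).length := by omega
    rw [pv_getD_int sel i hiI.1 h0n, pv_getD_int_succ sel i hiI.1 h1n] at hpi
    split at hpi
    case isFalse => simp at hpi
    case isTrue hc =>
      rw [List.mem_filter] at hpi
      obtain ⟨hpr, hb⟩ := hpi
      rw [PySem.List.mem_pyRange_one] at hpr
      rw [decide_eq_true_eq] at hb
      have hmemA : (pvSp sel)[i.toNat]'h0n ∈ sel :=
        (PySem.List.mem_sorted sel (fun x => x) false _).mp (List.getElem_mem h0n)
      have hmemB : (pvSp sel)[i.toNat + 1]'h1n ∈ sel :=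
        (PySem.List.mem_sorted sel (fun x => x) false _).mp (List.getElem_mem h1n)
      refine ⟨⟨by omega, hb.2⟩, (pvSp sel)[i.toNat]'h0n, hmemA,
        (pvSp sel)[i.toNat + 1]'h1n - (pvSp sel)[i.toNat]'h0n,
        ⟨by omega, by omega⟩, by omega, by omega, ?_⟩
      have he : (pvSp sel)[i.toNat]'h0n + ((pvSp sel)[i.toNat + 1]'h1n - (pvSp sel)[i.toNat]'h0n)
          = (pvSp sel)[i.toNat + 1]'h1n := by omega
      rw [he]
      exact hmemB
  · rintro ⟨⟨hp1, hpL⟩, s, hsmem, d, ⟨hd2, hdlt⟩, hsp, hpsd, hsd⟩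
    have hs' : s ∈ pvSp sel := by rw [pvSp, PySem.List.mem_sorted]; exact hsmem
    have ht' : s + d ∈ pvSp sel := by rw [pvSp, PySem.List.mem_sorted]; exact hsd
    have hp' : p ∉ pvSp sel := by rw [pvSp, PySem.List.mem_sorted]; exact hp
    obtain ⟨j, hj, hsle, hjp, hpj1, htle⟩ := pv_exists_adjacent sel s (s + d) p hs' ht' hsp hpsd hp'
    rw [pvLA, List.mem_flatMap]
    have h0j : (0 : Int) ≤ (j : Int) := by omega
    have hjn : ((j : Int)).toNat < (pvSp sel).length := by omega
    have hjn1 : ((j : Int)).toNat + 1 < (pvSp sel).length := by omega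
    refine ⟨(j : Int), ?_, ?_⟩
    · rw [PySem.List.mem_pyRange_one]
      exact ⟨by omega, by omega⟩
    · rw [pv_getD_int sel (j : Int) h0j hjn, pv_getD_int_succ sel (j : Int) h0j hjn1]
      simp only [Int.toNat_natCast]
      rw [if_pos ⟨by omega, by omega⟩]
      rw [List.mem_filter, PySem.List.mem_pyRange_one, decide_eq_true_eq]
      exact ⟨⟨by omega, by omega⟩, by omega, by omega⟩

-- pvLA is strictly increasing
lemma pv_LA_pairwise (sel chunk_ids : List Int) (max_gap : Int) :
    (pvLA sel chunk_ids max_gap).Pairwise (· < ·) := by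
  rw [pvLA, List.pairwise_flatMap]
  constructor
  · intro i _
    split
    · exact (PySem.List.pairwise_lt_pyRange_one _ _).filter _
    · exact List.Pairwise.nil
  · refine (PySem.List.pairwise_lt_pyRange_one 0 (((pvSp sel).length : Int) - 1)).imp_of_mem ?_
    intro i1 i2 hi1 hi2 hlt x hx y hy
    rw [PySem.List.mem_pyRange_one] at hi1 hi2
    split at hx
    case isFalse => simp at hx
    split at hy
    case isFalse => simp at hy
    have h1n : i1.toNat + 1 < (pvSp sel).length := by omega
    have h2n : i2.toNat + 1 < (pvSp sel).length := by omega
    have hi2len : i2.toNat < (pvSp sel).length := by omega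
    rw [pv_getD_int sel i1 hi1.1 (by omega), pv_getD_int_succ sel i1 hi1.1 h1n] at hx
    rw [pv_getD_int sel i2 hi2.1 hi2len, pv_getD_int_succ sel i2 hi2.1 h2n] at hy
    have hx2 := (PySem.List.mem_pyRange_one.mp (List.mem_of_mem_filter hx)).2
    have hy1 := (PySem.List.mem_pyRange_one.mp (List.mem_of_mem_filter hy)).1
    have hmono : (pvSp sel)[i1.toNat + 1]'h1n ≤ (pvSp sel)[i2.toNat]'hi2len :=
      pv_sp_mono sel (by omega) hi2len
    have hxc : x < (pvSp sel)[i2.toNat]'hi2len := lt_of_lt_of_le hx2 hmono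
    omega

-- pvRB is strictly increasing
lemma pv_RB_pairwise (sel chunk_ids : List Int) (max_gap : Int) :
    (pvRB sel chunk_ids max_gap).Pairwise (· < ·) :=
  (PySem.List.pairwise_lt_pyRange_one 1 (chunk_ids.length : Int)).sublist List.filter_sublist

-- ===== VERDICT (by name: the statement is the Claim_ definition above) =====
theorem fill_entity_gaps_py_spec : Claim_equal_fill_entity_gaps_py := by
  intro sel chunk_ids max_gap _
  unfold Spec_fill_entity_gaps_py
  rw [pv_A_shape, pv_B_shape, PySem.Set.update_eq_append_filter, PySem.Set.update_eq_append_filter]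
  congr 1
  have ndLA : (pvLA sel chunk_ids max_gap).Nodup :=
    (pv_LA_pairwise sel chunk_ids max_gap).imp (fun h => ne_of_lt h)
  have ndRB : (pvRB sel chunk_ids max_gap).Nodup :=
    (pv_RB_pairwise sel chunk_ids max_gap).imp (fun h => ne_of_lt h)
  rw [PySem.Set.ofList_eq_self_of_nodup _ ndLA, PySem.Set.ofList_eq_self_of_nodup _ ndRB]
  refine List.Perm.eq_of_pairwise (le := (· ≤ ·))
    (fun a b _ _ h1 h2 => le_antisymm h1 h2) ?_ ?_ ?_
  · exact ((pv_LA_pairwise sel chunk_ids max_gap).filter _).imp (fun h => le_of_lt h)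
  · exact ((pv_RB_pairwise sel chunk_ids max_gap).filter _).imp (fun h => le_of_lt h)
  · refine (List.perm_ext_iff_of_nodup (ndLA.filter _) (ndRB.filter _)).mpr ?_
    intro a
    rw [List.mem_filter, List.mem_filter]
    have hc : ((PySem.Set.ofList sel).contains a = false) ↔ a ∉ sel := by
      simp [PySem.Set.mem_ofList]
    constructor
    · rintro ⟨hmem, hcon⟩
      rw [Bool.not_eq_true'] at hcon
      have hns : a ∉ sel := hc.mp hcon
      have hla := (pv_mem_LA sel chunk_ids max_gap a hns).mp hmem
      refine ⟨(pv_mem_RB sel chunk_ids max_gap a).mpr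
        ⟨hla.1, (pv_cond_iff sel max_gap a).mp hla.2⟩, ?_⟩
      rw [Bool.not_eq_true']
      exact hcon
    · rintro ⟨hmem, hcon⟩
      rw [Bool.not_eq_true'] at hcon
      have hns : a ∉ sel := hc.mp hcon
      have hrb := (pv_mem_RB sel chunk_ids max_gap a).mp hmem
      refine ⟨(pv_mem_LA sel chunk_ids max_gap a hns).mpr
        ⟨hrb.1, (pv_cond_iff sel max_gap a).mpr hrb.2⟩, ?_⟩
      rw [Bool.not_eq_true']
      exact hcon
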